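-- pv_equiv track=rewrite | github.com/PiratesOnlineRewritten/Pirates-Online-Rewritten | pirates/minigame/DistributedBlackjackTable.py | allHandsToCurrentHands
-- ===== SOURCE A (Python) =====
-- def allHandsToCurrentHands(allHandsArray):
--     hands = []
--     length = len(allHandsArray)
--     for i in range(length):
--         handArray = allHandsArray[i]
--         total_hands = len(handArray)
--         if total_hands <= 1:
--             hands = hands + handArray
--         else:
--             for j in range(total_hands):
--                 k = total_hands - j - 1
--                 if k == 0 or len(handArray[k]) >= 2:
--                     hands = hands + [handArray[k]]
--                     break
--
--     return hands
-- ===== SOURCE B (Python) =====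
-- def allHandsToCurrentHands(allHandsArray):
--     hands = []
--     for handArray in allHandsArray:
--         if len(handArray) <= 1:
--             hands.extend(handArray)
--         else:
--             candidates = [h for h in handArray if len(h) >= 2]
--             hands.append(candidates[-1] if candidates else handArray[0])
--     return hands
-- ===== Notes on version B (the rewrite author's own statement) =====
-- stated objective: simpler
-- what changed: Replaces A's index-driven backward scan with break inside a nested loop by a forward filter of qualifying hands followed by taking the last candidate (or the group's first hand as fallback).
import Mathlib
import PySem

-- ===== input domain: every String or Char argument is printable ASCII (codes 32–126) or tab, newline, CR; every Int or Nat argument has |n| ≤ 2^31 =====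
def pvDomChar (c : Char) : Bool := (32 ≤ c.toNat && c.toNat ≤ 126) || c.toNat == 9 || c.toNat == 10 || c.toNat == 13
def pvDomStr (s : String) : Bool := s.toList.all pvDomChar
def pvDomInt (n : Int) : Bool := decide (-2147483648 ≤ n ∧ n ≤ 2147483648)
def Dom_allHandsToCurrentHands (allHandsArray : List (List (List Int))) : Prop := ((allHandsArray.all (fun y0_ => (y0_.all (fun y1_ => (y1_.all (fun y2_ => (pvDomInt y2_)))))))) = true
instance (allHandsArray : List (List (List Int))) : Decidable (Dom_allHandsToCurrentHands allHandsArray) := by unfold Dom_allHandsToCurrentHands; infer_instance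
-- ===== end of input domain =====

-- B replaces A's backward scan-with-break by a forward filter then last-candidate pick; objective: simpler.

-- ===== PORT A =====
-- inner 'for j in range(total_hands)' with k = total_hands - j - 1 and break:
-- a descending scan over k = total-1, …, 0 that stops at the first k with
-- k == 0 or len(handArray[k]) >= 2; ported as recursion on the descending index k.
def pickA (handArray : List (List Int)) : Nat → List Int
  | 0 => PySem.List.pyGetD handArray 0 []
  | k+1 =>
      if 2 ≤ (PySem.List.pyGetD handArray ((k : Int)+1) []).length then
        PySem.List.pyGetD handArray ((k : Int)+1) []
      else pickA handArray k

def allHandsToCurrentHands (allHandsArray : List (List (List Int))) : List (List Int) :=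
  (PySem.List.pyRange 0 (allHandsArray.length : Int) 1).foldl
    (fun hands i =>
      let handArray := PySem.List.pyGetD allHandsArray i []
      let total := handArray.length
      if total ≤ 1 then hands ++ handArray
      else hands ++ [pickA handArray (total - 1)])
    []

-- ===== PORT B =====
def allHandsToCurrentHands_alt (allHandsArray : List (List (List Int))) : List (List Int) :=
  allHandsArray.foldl
    (fun hands handArray =>
      if handArray.length ≤ 1 then hands ++ handArray
      else
        let candidates := handArray.filter (fun h => 2 ≤ h.length)
        hands ++ [candidates.getLast?.getD (handArray.headD [])])
    []

-- ===== PRECONDITION & SPEC =====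
def Spec_allHandsToCurrentHands (allHandsArray : List (List (List Int))) (out : List (List Int)) : Prop := out = allHandsToCurrentHands_alt allHandsArray
instance (allHandsArray : List (List (List Int))) (out : List (List Int)) : Decidable (Spec_allHandsToCurrentHands allHandsArray out) := by unfold Spec_allHandsToCurrentHands; infer_instance

-- ===== CLAIM (what is proved, stated in full; the proofs are below) =====
def Claim_equal_allHandsToCurrentHands : Prop := ∀ (allHandsArray : List (List (List Int))), Dom_allHandsToCurrentHands allHandsArray → Spec_allHandsToCurrentHands allHandsArray (allHandsToCurrentHands allHandsArray)

-- ===== LEMMAS AND PROOFS =====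

-- pickA only looks at indices ≤ k, so appending an element beyond k does not change it
theorem pickA_append (m : List (List Int)) (a : List Int) :
    ∀ k : Nat, k < m.length → pickA (m ++ [a]) k = pickA m k := by
  intro k
  induction k with
  | zero =>
      intro hk
      simp only [pickA, PySem.List.pyGetD_zero]
      cases m with
      | nil => simp at hk
      | cons x xs => simp
  | succ k ih =>
      intro hk
      simp only [pickA]
      have h1 : ((k : Int) + 1) = ((k+1 : Nat) : Int) := by push_cast; ring
      rw [h1, PySem.List.pyGetD_eq_getElem _ _ (by positivity)
            (by exact_mod_cast (by simp; omega : k+1 < (m ++ [a]).length)),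
          PySem.List.pyGetD_eq_getElem _ _ (by positivity) (by exact_mod_cast hk)]
      simp only [Int.toNat_natCast]
      rw [List.getElem_append_left hk]
      split_ifs with h
      · rfl
      · exact ih (Nat.lt_of_succ_lt hk)

-- A's descending scan equals B's filter-then-last pick, for nonempty groups
theorem pickA_eq_filter (l : List (List Int)) (hne : l ≠ []) :
    pickA l (l.length - 1)
      = ((l.filter (fun h => 2 ≤ h.length)).getLast?).getD (l.headD []) := by
  induction l using List.reverseRecOn with
  | nil => exact absurd rfl hne
  | append_singleton m a ih =>
      rcases eq_or_ne m [] with rfl | hm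
      · simp only [List.nil_append, List.length_cons, List.length_nil, Nat.add_sub_cancel]
        simp only [pickA, PySem.List.pyGetD_zero]
        by_cases h : 2 ≤ a.length <;> simp [List.filter, h]
      · have hlen : 1 ≤ m.length := Nat.one_le_iff_ne_zero.mpr
          (fun h => hm (List.eq_nil_of_length_eq_zero h))
        have hml : (m ++ [a]).length - 1 = m.length := by simp
        rw [hml]
        obtain ⟨k, hk⟩ : ∃ k, m.length = k + 1 := ⟨m.length - 1, (Nat.succ_pred_eq_of_pos hlen).symm⟩
        rw [hk]
        simp only [pickA]
        have hget : PySem.List.pyGetD (m ++ [a]) ((k : Int) + 1) [] = a := by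
          have h1 : ((k : Int) + 1) = ((k+1 : Nat) : Int) := by push_cast; ring
          rw [h1, PySem.List.pyGetD_eq_getElem _ _ (by positivity)
                (by exact_mod_cast (by simp; omega : k+1 < (m ++ [a]).length))]
          simp only [Int.toNat_natCast]
          have : k + 1 = m.length := hk.symm
          rw [List.getElem_append_right (by omega)]
          simp [this]
        rw [hget]
        have hhead : (m ++ [a]).headD ([] : List Int) = m.headD [] := by
          cases m with
          | nil => exact absurd rfl hm
          | cons x xs => simp
        split_ifs with h
        · simp [List.filter_append, List.filter, h]
        · have h2 : pickA (m ++ [a]) k = pickA m k := pickA_append m a k (by omega)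
          have h3 : k = m.length - 1 := by omega
          rw [h2, h3, ih hm, hhead]
          simp [List.filter_append, List.filter, h]

-- ===== VERDICT (by name: the statement is the Claim_ definition above) =====
theorem allHandsToCurrentHands_spec : Claim_equal_allHandsToCurrentHands := by
  intro xs _
  unfold Spec_allHandsToCurrentHands allHandsToCurrentHands allHandsToCurrentHands_alt
  exact (PySem.List.foldl_pyRange_zero_pyGetD' xs ([] : List (List Int))
      (fun hands handArray =>
        if handArray.length ≤ 1 then hands ++ handArray
        else hands ++ [pickA handArray (handArray.length - 1)]) []).trans
    (PySem.List.foldl_congr_mem xs _ _ []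
      (by
        intro acc l _
        by_cases h : l.length ≤ 1
        · simp [h]
        · have hne : l ≠ [] := by intro h0; rw [h0] at h; simp at h
          simp only [h, if_false]
          rw [pickA_eq_filter l hne]))
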